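-- pv_equiv track=rewrite | github.com/prabowo02/project_euler | codes/PE261.py | square_free
-- ===== SOURCE A (Python) =====
-- def square_free(n):
--     i, squares = 2, 1
--     while i*i <= n:
--         while n % (i*i) == 0:
--             n //= i*i
--             squares *= i
--         i += 1
--     return n, squares
-- ===== SOURCE B (Python) =====
-- def square_free(n):
--     best, s = 1, 1
--     while (s + 1) * (s + 1) <= n:
--         s += 1
--         if n % (s * s) == 0:
--             best = s
--     return n // (best * best), best
-- ===== Notes on version B (the rewrite author's own statement) =====
-- stated objective: alternative
-- what changed: B does no factorization at all: instead of A's trial division stripping prime squares, B scans s = 2..isqrt(n) once to find the largest integer `best` whose square divides n and returns (n // best**2, best); this is correct because A's `squares` is exactly the largest square-root divisor of n.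
import Mathlib
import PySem

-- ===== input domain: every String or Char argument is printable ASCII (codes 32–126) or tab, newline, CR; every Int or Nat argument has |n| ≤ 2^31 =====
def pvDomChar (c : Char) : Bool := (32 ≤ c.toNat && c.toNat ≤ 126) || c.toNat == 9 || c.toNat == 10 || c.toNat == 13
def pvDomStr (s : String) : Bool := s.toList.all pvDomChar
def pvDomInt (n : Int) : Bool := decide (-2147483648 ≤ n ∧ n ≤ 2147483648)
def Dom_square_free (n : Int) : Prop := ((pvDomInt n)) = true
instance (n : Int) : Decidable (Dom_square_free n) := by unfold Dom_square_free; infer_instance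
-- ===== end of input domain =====

-- B replaces A's trial-division stripping of prime squares by a single scan for the largest
-- integer whose square divides n (objective: alternative; same asymptotic cost).
-- The `fuel` parameters and the `2 ≤ i` / `0 < n` conjuncts in the A-side loops are totality
-- guards only; they hold on every state the Python loops actually reach.

-- ===== PORT A =====
-- inner loop of A: 'while n % (i*i) == 0: n //= i*i; squares *= i'
def innerA (i : Int) : Nat → Int → Int → Int × Int
  | 0, n, sq => (n, sq)
  | fuel + 1, n, sq =>
    if 2 ≤ i ∧ 0 < n ∧ n % (i * i) = 0 then innerA i fuel (n / (i * i)) (sq * i)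
    else (n, sq)

-- outer loop of A: 'while i*i <= n: … ; i += 1'
def outerA : Nat → Int → Int → Int → Int × Int
  | 0, n, _, sq => (n, sq)
  | fuel + 1, n, i, sq =>
    if 2 ≤ i ∧ i * i ≤ n then
      outerA fuel (innerA i n.toNat n sq).1 (i + 1) (innerA i n.toNat n sq).2
    else (n, sq)

def square_free (n : Int) : Int × Int := outerA (n.toNat + 1) n 2 1

-- ===== PORT B =====
-- B's loop: 'while (s+1)*(s+1) <= n: s += 1; if n % (s*s) == 0: best = s'
def bestB : Nat → Int → Int → Int → Int
  | 0, _, best, _ => best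
  | fuel + 1, n, best, s =>
    if (s + 1) * (s + 1) ≤ n then
      bestB fuel n (if n % ((s + 1) * (s + 1)) = 0 then s + 1 else best) (s + 1)
    else best

-- 'return n // (best * best), best'
def square_free_alt (n : Int) : Int × Int :=
  (n / (bestB (n.toNat + 1) n 1 1 * bestB (n.toNat + 1) n 1 1), bestB (n.toNat + 1) n 1 1)

-- ===== PRECONDITION & SPEC =====
def Spec_square_free (n : Int) (out : Int × Int) : Prop := out = square_free_alt n
instance (n : Int) (out : Int × Int) : Decidable (Spec_square_free n out) := by unfold Spec_square_free; infer_instance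

-- ===== CLAIM (what is proved, stated in full; the proofs are below) =====
def Claim_equal_square_free : Prop := ∀ (n : Int), Dom_square_free n → Spec_square_free n (square_free n)

-- ===== LEMMAS AND PROOFS =====

-- division by a divisor ≥ 2 strictly shrinks a positive integer
theorem pv_div_shrink (n b : Int) (hn : 0 < n) (hb : 2 ≤ b) (h : n % b = 0) :
    0 < n / b ∧ n / b < n := by
  have hdvd : b ∣ n := Int.dvd_of_emod_eq_zero h
  have hq : n / b * b = n := Int.ediv_mul_cancel hdvd
  constructor
  · rcases lt_or_ge 0 (n / b) with h' | h'
    · exact h'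
    · nlinarith
  · rcases lt_or_ge (n / b) n with h' | h'
    · exact h'
    · nlinarith

-- characterisation of A's inner loop: it keeps a divisor of n, removes all factors i*i,
-- and preserves sq²·n
theorem innerA_spec (i : Int) : ∀ (F : Nat) (n sq : Int), 2 ≤ i → 0 < n → 0 < sq →
    n.toNat ≤ F →
    0 < (innerA i F n sq).1 ∧ 0 < (innerA i F n sq).2 ∧ (innerA i F n sq).1 ∣ n ∧
    ¬ i * i ∣ (innerA i F n sq).1 ∧
    (innerA i F n sq).2 * (innerA i F n sq).2 * (innerA i F n sq).1 = sq * sq * n := by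
  intro F
  induction F with
  | zero => intro n sq h2 hn hsq hF; omega
  | succ F ih =>
    intro n sq h2 hn hsq hF
    by_cases h : 2 ≤ i ∧ 0 < n ∧ n % (i * i) = 0
    · simp only [innerA, if_pos h]
      have hii : (2:Int) ≤ i * i := by nlinarith
      have hshr := pv_div_shrink n (i * i) hn hii h.2.2
      have hdvd : i * i ∣ n := Int.dvd_of_emod_eq_zero h.2.2
      have hc : i * i * (n / (i * i)) = n := Int.mul_ediv_cancel' hdvd
      obtain ⟨h1, h2', h3, h4, h5⟩ := ih (n / (i * i)) (sq * i)
        h2 hshr.1 (mul_pos hsq (by omega)) (by omega)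
      refine ⟨h1, h2', dvd_trans h3 ⟨i * i, by rw [mul_comm]; exact hc.symm⟩, h4, ?_⟩
      rw [h5]
      calc sq * i * (sq * i) * (n / (i * i)) = sq * sq * (i * i * (n / (i * i))) := by ring
        _ = sq * sq * n := by rw [hc]
    · simp only [innerA, if_neg h]
      refine ⟨hn, hsq, dvd_refl n, ?_, trivial⟩
      intro hd
      exact h ⟨h2, hn, Int.emod_eq_zero_of_dvd hd⟩
      

-- characterisation of A's outer loop: the result (r, s) satisfies s²·r = sq²·n and r has no
-- square prime factor
theorem outerA_spec : ∀ (F : Nat) (n i sq : Int), 2 ≤ i → 0 < n → 0 < sq →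
    (∀ p, 2 ≤ p → Prime p → p < i → ¬ p * p ∣ n) → n < i + F →
    0 < (outerA F n i sq).1 ∧ 0 < (outerA F n i sq).2 ∧
    (outerA F n i sq).2 * (outerA F n i sq).2 * (outerA F n i sq).1 = sq * sq * n ∧
    (∀ p, 2 ≤ p → Prime p → ¬ p * p ∣ (outerA F n i sq).1) := by
  intro F
  induction F with
  | zero =>
    intro n i sq h2 hn hsq hp hF
    simp only [outerA]
    refine ⟨hn, hsq, trivial, ?_⟩
    intro p hp2 hpr hd
    have hple : p * p ≤ n := Int.le_of_dvd hn hd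
    have hpp : p ≤ p * p := le_mul_of_one_le_left (by omega) (by omega)
    exact hp p hp2 hpr (by push_cast at hF; linarith) hd
  | succ F ih =>
    intro n i sq h2 hn hsq hp hF
    by_cases hg : 2 ≤ i ∧ i * i ≤ n
    · simp only [outerA, if_pos hg]
      obtain ⟨h1, h2', h3, h4, h5⟩ := innerA_spec i n.toNat n sq h2 hn hsq le_rfl
      have hle : (innerA i n.toNat n sq).1 ≤ n := Int.le_of_dvd hn h3
      obtain ⟨ha, hb, hc, hd⟩ := ih (innerA i n.toNat n sq).1 (i + 1) (innerA i n.toNat n sq).2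
        (by omega) h1 h2'
        (by intro p hp2 hpr hpi hdd
            rcases lt_or_eq_of_le (show p ≤ i by omega) with h' | h'
            · exact hp p hp2 hpr h' (dvd_trans hdd h3)
            · exact h4 (h' ▸ hdd))
        (by omega)
      exact ⟨ha, hb, by rw [hc, h5], hd⟩
    · simp only [outerA, if_neg hg]
      have hgt : n < i * i := by rcases not_and_or.mp hg with h | h <;> omega
      refine ⟨hn, hsq, trivial, ?_⟩
      intro p hp2 hpr hd
      have hple : p * p ≤ n := Int.le_of_dvd hn hd
      have hpi : p < i := by
        by_contra h'
        have h1 : i ≤ p := by omega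
        have h2' : i * i ≤ p * p := mul_le_mul h1 h1 (by omega) (by omega)
        linarith
      exact hp p hp2 hpr hpi hd

-- characterisation of B's loop: it returns the largest k with k²∣n
theorem bestB_spec : ∀ (F : Nat) (n best s : Int), 0 < s → s * s ≤ n →
    0 < best → best ≤ s → best * best ∣ n →
    (∀ k, best < k → k ≤ s → ¬ k * k ∣ n) → n ≤ s + F →
    0 < bestB F n best s ∧ bestB F n best s * bestB F n best s ∣ n ∧
    (∀ k, 0 < k → k * k ∣ n → k ≤ bestB F n best s) := by
  intro F
  induction F with
  | zero =>
    intro n best s hs hsn hb hbs hbd hinv hF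
    simp only [bestB]
    refine ⟨hb, hbd, ?_⟩
    intro k hk hkd
    have hn : 0 < n := by nlinarith
    have hkn : k * k ≤ n := Int.le_of_dvd hn hkd
    have hkk : k ≤ k * k := le_mul_of_one_le_left (by omega) (by omega)
    have hks : k ≤ s := by push_cast at hF; linarith
    by_contra hlt
    exact hinv k (by omega) hks hkd
  | succ F ih =>
    intro n best s hs hsn hb hbs hbd hinv hF
    by_cases hg : (s + 1) * (s + 1) ≤ n
    · simp only [bestB, if_pos hg]
      by_cases hm : n % ((s + 1) * (s + 1)) = 0
      · rw [if_pos hm]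
        exact ih n (s + 1) (s + 1) (by omega) hg (by omega) le_rfl
          (Int.dvd_of_emod_eq_zero hm) (by intro k h1 h2 _; omega) (by omega)
      · rw [if_neg hm]
        exact ih n best (s + 1) (by omega) hg hb (by omega) hbd
          (by intro k h1 h2 hkd
              rcases lt_or_eq_of_le h2 with h' | h'
              · exact hinv k h1 (by omega) hkd
              · exact hm (Int.emod_eq_zero_of_dvd (h' ▸ hkd)))
          (by omega)
    · simp only [bestB, if_neg hg]
      refine ⟨hb, hbd, ?_⟩
      intro k hk hkd
      have hn : 0 < n := by nlinarith
      have hkn : k * k ≤ n := Int.le_of_dvd hn hkd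
      have hks : k ≤ s := by
        by_contra h'
        have h1 : s + 1 ≤ k := by omega
        have h2' : (s + 1) * (s + 1) ≤ k * k := mul_le_mul h1 h1 (by omega) (by omega)
        omega
      by_contra hlt
      exact hinv k (by omega) hks hkd

-- maximality: if r has no square prime factor and b² ∣ s²·r then b ≤ s
theorem pv_sq_dvd_le (b s r : Int) (hb : 0 < b) (hs : 0 < s) (hr : 0 < r)
    (hsf : ∀ p, 2 ≤ p → Prime p → ¬ p * p ∣ r) (hd : b * b ∣ s * s * r) : b ≤ s := by
  have hBd : b.natAbs * b.natAbs ∣ s.natAbs * s.natAbs * r.natAbs := by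
    have := Int.natAbs_dvd_natAbs.mpr hd
    simpa [Int.natAbs_mul] using this
  have hB0 : b.natAbs ≠ 0 := by omega
  have hS0 : s.natAbs ≠ 0 := by omega
  have hR0 : r.natAbs ≠ 0 := by omega
  have hsfR : Squarefree r.natAbs := by
    rw [Nat.squarefree_iff_prime_squarefree]
    intro p hp hdp
    have hp' : Nat.Prime p := hp
    apply hsf (p : Int) (by exact_mod_cast hp'.two_le) (Nat.prime_iff_prime_int.mp hp')
    have h1 : ((p * p : ℕ) : Int) ∣ (r.natAbs : Int) := Int.natCast_dvd_natCast.mpr hdp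
    rw [Int.natAbs_of_nonneg hr.le] at h1
    exact_mod_cast h1
  have hfac := (Nat.factorization_le_iff_dvd (by simp [hB0]) (by simp [hS0, hR0])).mpr hBd
  have hdvdBS : b.natAbs ∣ s.natAbs := by
    rw [← Nat.factorization_le_iff_dvd hB0 hS0]
    intro p
    have h1 := Finsupp.le_def.mp hfac p
    rw [Nat.factorization_mul (Nat.mul_ne_zero hS0 hS0) hR0,
        Nat.factorization_mul hS0 hS0, Nat.factorization_mul hB0 hB0] at h1
    have h2 := (Nat.squarefree_iff_factorization_le_one hR0).mp hsfR p
    simp only [Finsupp.add_apply] at h1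
    omega
  have hle : b.natAbs ≤ s.natAbs := Nat.le_of_dvd (by omega) hdvdBS
  omega

-- ===== VERDICT (by name: the statement is the Claim_ definition above) =====
theorem square_free_spec : Claim_equal_square_free := by
  intro n _
  unfold Spec_square_free square_free square_free_alt
  by_cases hn : 1 ≤ n
  · obtain ⟨hr, hs, heq, hsf⟩ := outerA_spec (n.toNat + 1) n 2 1 (by omega) (by omega)
      (by omega) (by intro p hp2 _ hpi _; omega) (by omega)
    obtain ⟨hb, hbd, hmax⟩ := bestB_spec (n.toNat + 1) n 1 1 (by omega) (by omega)
      (by omega) le_rfl (by simp)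
      (by intro k h1 h2 _; omega) (by omega)
    rw [one_mul, one_mul] at heq
    set P := outerA (n.toNat + 1) n 2 1 with hP
    set bb := bestB (n.toNat + 1) n 1 1 with hbb
    have hsb : P.2 ≤ bb := hmax P.2 hs ⟨P.1, by rw [← heq]⟩
    have hbs : bb ≤ P.2 := by
      apply pv_sq_dvd_le bb P.2 P.1 hb hs hr hsf
      rw [heq]; exact hbd
    have hbe : bb = P.2 := le_antisymm hbs hsb
    have hdiv : n / (bb * bb) = P.1 := by
      rw [hbe, ← heq]
      exact Int.mul_ediv_cancel_left _ (ne_of_gt (mul_pos hs hs))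
    exact Prod.ext hdiv.symm hbe.symm
  · have hz : n.toNat = 0 := by omega
    rw [hz]
    simp only [outerA, bestB, if_neg (show ¬ ((2:Int) ≤ 2 ∧ 2 * 2 ≤ n) by omega),
      if_neg (show ¬ ((1:Int) + 1) * (1 + 1) ≤ n by omega)]
    norm_num
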